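-- pv_equiv track=rewrite | github.com/CiroExe/Teoria-de-la-informacion | tp3/ej6.py | Instantaneo
-- ===== SOURCE A (Python) =====
-- def Instantaneo(lista):
--     n=len(lista)
--     for i in range(n):
--         x = lista[i]
--         for j in range(n):
--             if(i != j and lista[j].startswith(x)):
--                 return True #Instantaneo, pues existe al menos una palabra codigo que tiene como prefijo a x
--     return False #Devuelve falso por defecto
-- ===== SOURCE B (Python) =====
-- def Instantaneo(lista):
--     s = sorted(lista)
--     return any(b.startswith(a) for a, b in zip(s, s[1:]))
-- ===== Notes on version B (the rewrite author's own statement) =====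
-- stated objective: alternative
-- what changed: Replaced the all-pairs startswith scan by sorting the list and checking only adjacent pairs for a prefix relation; the correctness rests on prefix pairs surviving between lexicographic neighbours.
import Mathlib
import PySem

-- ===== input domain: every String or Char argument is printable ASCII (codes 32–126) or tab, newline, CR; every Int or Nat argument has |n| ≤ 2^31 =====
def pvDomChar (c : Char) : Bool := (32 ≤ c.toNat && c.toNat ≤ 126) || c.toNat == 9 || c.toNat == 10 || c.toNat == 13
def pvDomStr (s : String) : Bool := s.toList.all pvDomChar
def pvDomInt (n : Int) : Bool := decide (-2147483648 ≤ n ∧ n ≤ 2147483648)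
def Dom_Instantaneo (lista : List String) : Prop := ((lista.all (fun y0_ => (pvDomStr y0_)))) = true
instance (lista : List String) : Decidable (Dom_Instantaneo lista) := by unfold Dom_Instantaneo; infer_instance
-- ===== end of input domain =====

-- B sorts the list and checks only adjacent pairs for a prefix relation, instead of A's all-pairs scan.

-- ===== PORT A =====
def Instantaneo (lista : List String) : Bool :=
  let n : Int := lista.length
  (PySem.List.pyRange 0 n 1).any (fun i =>
    let x := PySem.List.pyGetD lista i ""
    (PySem.List.pyRange 0 n 1).any (fun j =>
      (i != j) && PySem.Str.startswith (PySem.List.pyGetD lista j "") x))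

-- ===== PORT B =====
def Instantaneo_alt (lista : List String) : Bool :=
  ((PySem.List.sorted lista (fun x => x) false).zip
      (PySem.List.slice (PySem.List.sorted lista (fun x => x) false) (some 1) none)).any
    (fun p => PySem.Str.startswith p.2 p.1)

-- ===== PRECONDITION & SPEC =====
def Spec_Instantaneo (lista : List String) (out : Bool) : Prop := out = Instantaneo_alt lista
instance (lista : List String) (out : Bool) : Decidable (Spec_Instantaneo lista out) := by unfold Spec_Instantaneo; infer_instance

-- ===== CLAIM (what is proved, stated in full; the proofs are below) =====
def Claim_equal_Instantaneo : Prop := ∀ (lista : List String), Dom_Instantaneo lista → Spec_Instantaneo lista (Instantaneo lista)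

-- ===== LEMMAS AND PROOFS =====

-- 'a is a prefix of b', the relation both programs detect
def strPref (a b : String) : Prop := a.toList <+: b.toList

-- A prefix is lexicographically ≤ (list level, strict-or-equal form)
theorem prefix_lex (x y : List Char) (h : x <+: y) : List.Lex (· < ·) x y ∨ x = y := by
  induction x generalizing y with
  | nil =>
    cases y with
    | nil => exact Or.inr rfl
    | cons b ys => exact Or.inl List.Lex.nil
  | cons a xs ih =>
    cases y with
    | nil => simp at h
    | cons b ys =>
      rw [List.cons_prefix_cons] at h
      obtain ⟨rfl, h2⟩ := h
      rcases ih ys h2 with h3 | h3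
      · exact Or.inl (List.Lex.cons h3)
      · exact Or.inr (by rw [h3])

-- if x is a prefix of z and x < y < z lexicographically, then x is a prefix of y
theorem lex_sandwich (x y z : List Char) (hxy : List.Lex (· < ·) x y)
    (hyz : List.Lex (· < ·) y z) (hxz : x <+: z) : x <+: y := by
  induction hxy generalizing z with
  | nil => exact List.nil_prefix
  | @rel a b x' y' hab =>
    cases z with
    | nil => simp at hxz
    | cons c z' =>
      rw [List.cons_prefix_cons] at hxz
      obtain ⟨rfl, _⟩ := hxz
      cases hyz with
      | rel h' => exact absurd h' (lt_asymm hab)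
      | cons h' => exact absurd hab (lt_irrefl _)
  | @cons a x' y' h ih =>
    cases z with
    | nil => simp at hxz
    | cons c z' =>
      rw [List.cons_prefix_cons] at hxz
      obtain ⟨rfl, hxz'⟩ := hxz
      cases hyz with
      | rel h' => exact absurd h' (lt_irrefl _)
      | cons h' => exact List.cons_prefix_cons.mpr ⟨rfl, ih z' h' hxz'⟩

theorem strPref_le {a b : String} (h : strPref a b) : a ≤ b := by
  rcases prefix_lex _ _ h with h' | h'
  · exact le_of_lt (String.lt_iff_toList_lt.mpr h')
  · exact le_of_eq (String.toList_inj.mp h')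

theorem str_sandwich {x y z : String} (hxz : strPref x z) (h1 : x ≤ y) (h2 : y ≤ z) :
    strPref x y := by
  rcases lt_or_eq_of_le h1 with h1' | h1'
  · rcases lt_or_eq_of_le h2 with h2' | h2'
    · exact lex_sandwich _ _ _ (String.lt_iff_toList_lt.mp h1')
        (String.lt_iff_toList_lt.mp h2') hxz
    · rw [← h2'] at hxz; exact hxz
  · rw [← h1']; exact List.prefix_refl _

-- in a ≤-sorted list, a prefix pair at i < j yields an adjacent prefix pair
theorem adj_of_pair (s : List String) (hp : s.Pairwise (· ≤ ·)) (i j : Nat)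
    (hj : j < s.length) (hij : i < j) (h : strPref s[i] s[j]) :
    ∃ k, ∃ _ : k + 1 < s.length, strPref s[k] s[k + 1] := by
  have hi : i < s.length := lt_trans hij hj
  have h1 : i + 1 < s.length := by omega
  have mono := List.pairwise_iff_getElem.mp hp
  have ha : s[i] ≤ s[i + 1] := mono i (i + 1) hi h1 (by omega)
  have hb : s[i + 1] ≤ s[j] := by
    rcases Nat.lt_or_ge (i + 1) j with h' | h'
    · exact mono _ _ h1 hj h'
    · have he : i + 1 = j := by omega
      subst he; exact le_refl _
  exact ⟨i, h1, str_sandwich h ha hb⟩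

theorem exists_pair_iff_adj (s : List String) (hp : s.Pairwise (· ≤ ·)) :
    (∃ i j, ∃ _ : i < s.length, ∃ _ : j < s.length, i ≠ j ∧ strPref s[i] s[j]) ↔
    (∃ k, ∃ _ : k + 1 < s.length, strPref s[k] s[k + 1]) := by
  constructor
  · rintro ⟨i, j, hi, hj, hne, h⟩
    rcases Nat.lt_or_ge i j with hij | hge
    · exact adj_of_pair s hp i j hj hij h
    · have hji : j < i := by omega
      have hle : s[j] ≤ s[i] := List.pairwise_iff_getElem.mp hp j i hj hi hji
      have heq : s[i] = s[j] := le_antisymm (strPref_le h) hle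
      refine adj_of_pair s hp j i hi hji ?_
      unfold strPref
      rw [heq]
  · rintro ⟨k, h, hk⟩
    exact ⟨k, k + 1, by omega, h, by omega, hk⟩

-- '∃ distinct positions i j with xs[i] a prefix of xs[j]' as a ¬Pairwise, to transport along a permutation
theorem pair_iff_not_pairwise (xs : List String) :
    (∃ i j, ∃ _ : i < xs.length, ∃ _ : j < xs.length, i ≠ j ∧ strPref xs[i] xs[j]) ↔
    ¬ xs.Pairwise (fun a b => ¬ (strPref a b ∨ strPref b a)) := by
  rw [List.pairwise_iff_getElem]
  push Not
  constructor
  · rintro ⟨i, j, hi, hj, hne, h⟩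
    rcases Nat.lt_or_ge i j with hij | hge
    · exact ⟨i, j, hi, hj, hij, Or.inl h⟩
    · exact ⟨j, i, hj, hi, by omega, Or.inr h⟩
  · rintro ⟨i, j, hi, hj, hij, h | h⟩
    · exact ⟨i, j, hi, hj, by omega, h⟩
    · exact ⟨j, i, hj, hi, by omega, h⟩

theorem A_iff (lista : List String) : Instantaneo lista = true ↔
    (∃ i j, ∃ _ : i < lista.length, ∃ _ : j < lista.length, i ≠ j ∧ strPref lista[i] lista[j]) := by
  unfold Instantaneo
  simp only [List.any_eq_true, PySem.List.mem_pyRange_one, Bool.and_eq_true, bne_iff_ne]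
  constructor
  · rintro ⟨i, ⟨hi0, hin⟩, j, ⟨hj0, hjn⟩, hne, hsw⟩
    rw [PySem.List.pyGetD_eq_getElem lista "" hi0 hin, PySem.List.pyGetD_eq_getElem lista "" hj0 hjn] at hsw
    rw [PySem.Str.startswith_eq, PySem.Chars.startswith_iff] at hsw
    exact ⟨i.toNat, j.toNat, by omega, by omega, by omega, hsw⟩
  · rintro ⟨i, j, hi, hj, hne, h⟩
    refine ⟨(i : Int), ⟨by omega, by exact_mod_cast hi⟩, (j : Int), ⟨by omega, by exact_mod_cast hj⟩,
      by exact_mod_cast hne, ?_⟩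
    rw [PySem.List.pyGetD_eq_getElem lista (i := (i : Int)) "" (by omega) (by exact_mod_cast hi),
        PySem.List.pyGetD_eq_getElem lista (i := (j : Int)) "" (by omega) (by exact_mod_cast hj)]
    rw [PySem.Str.startswith_eq, PySem.Chars.startswith_iff]
    simpa using h

theorem B_iff (lista : List String) : Instantaneo_alt lista = true ↔
    (∃ k, ∃ _ : k + 1 < (PySem.List.sorted lista (fun x => x) false).length,
      strPref (PySem.List.sorted lista (fun x => x) false)[k]
              (PySem.List.sorted lista (fun x => x) false)[k + 1]) := by
  unfold Instantaneo_alt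
  rw [PySem.List.slice_from_one]
  simp only [List.any_eq_true, List.mem_iff_getElem]
  constructor
  · rintro ⟨p, ⟨k, hk, hp⟩, hsw⟩
    rw [List.length_zip, List.length_tail] at hk
    have hk1 : k + 1 < (PySem.List.sorted lista (fun x => x) false).length := by omega
    rw [List.getElem_zip, List.getElem_tail] at hp
    rw [← hp] at hsw
    rw [PySem.Str.startswith_eq, PySem.Chars.startswith_iff] at hsw
    exact ⟨k, hk1, hsw⟩
  · rintro ⟨k, hk, h⟩
    refine ⟨((PySem.List.sorted lista (fun x => x) false)[k],
            (PySem.List.sorted lista (fun x => x) false)[k + 1]), ⟨k, ?_, ?_⟩, ?_⟩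
    · rw [List.length_zip, List.length_tail]; omega
    · rw [List.getElem_zip, List.getElem_tail]
    · rw [PySem.Str.startswith_eq, PySem.Chars.startswith_iff]
      simpa using h

-- ===== VERDICT (by name: the statement is the Claim_ definition above) =====
theorem Instantaneo_spec : Claim_equal_Instantaneo := by
  intro lista _
  unfold Spec_Instantaneo
  rw [Bool.eq_iff_iff, A_iff, B_iff]
  have hperm : (PySem.List.sorted lista (fun x => x) false).Perm lista :=
    PySem.List.sorted_perm lista (fun x => x) false
  have hsym : ∀ {a b : String}, ¬ (strPref a b ∨ strPref b a) → ¬ (strPref b a ∨ strPref a b) :=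
    fun hab => by tauto
  have hp : (PySem.List.sorted lista (fun x => x) false).Pairwise (· ≤ ·) := by
    have := PySem.List.sorted_pairwise lista (fun x => x)
    simpa using this
  exact ((pair_iff_not_pairwise lista).trans
      (not_congr (hperm.pairwise_iff hsym).symm)).trans
    ((pair_iff_not_pairwise _).symm.trans (exists_pair_iff_adj _ hp))
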